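-- pv_equiv track=rewrite | github.com/TheAgentMaro/Dynamic-Programming | strategie_glutonne.py | strategie_gloutonne
-- ===== SOURCE A (Python) =====
-- def strategie_gloutonne(n, m, T):
--     """
--     Implémente la stratégie gloutonne pour déterminer quelle essence d'arbre planter à chaque emplacement
--     afin de minimiser le coût total.
--
--     Args:
--         n (int): Nombre d'emplacements.
--         m (int): Nombre d'essences d'arbres.
--         T (List[List[int]]): Matrice de coûts pour planter une essence d'arbre à un emplacement donné.
--
--     Returns:
--         Tuple[int, List[int]]: Le coût total de la plantation et la liste des différentes essences utilisées.
--     """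
--     total_cost = 0
--     used_essences = []
--     last_essence = None
--
--     for i in range(n):
--         min_cost = float('inf')
--         min_essence = None
--
--         for j in range(m):
--             if j != last_essence:
--                 cost = T[i][j]
--                 if cost < min_cost:
--                     min_cost = cost
--                     min_essence = j
--
--         total_cost += min_cost
--         used_essences.append(min_essence)
--         last_essence = min_essence
--
--     return total_cost, used_essences
-- ===== SOURCE B (Python) =====
-- def strategie_gloutonne(n, m, T):
--     """Greedy planting, recursive decomposition: each row's essence is the
--     lexicographic min() of (cost, index) tuples over the row's first m entries,
--     skipping the previous row's essence; results are assembled back-to-front."""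
--     def go(rows, last):
--         if not rows:
--             return 0, []
--         c, j = min((cost, j) for j, cost in enumerate(rows[0][:m]) if j != last)
--         t, u = go(rows[1:], j)
--         return c + t, [j] + u
--
--     return go(T[:max(n, 0)], None)
-- ===== Notes on version B (the rewrite author's own statement) =====
-- stated objective: alternative
-- what changed: B replaces A's nested index loops with running min-state by a recursion over the rows of T[:n] that picks each row's essence as the lexicographic min() of (cost, index) tuples over a filtered enumerate and assembles the result back-to-front.
-- outside the precondition, e.g. on strategie_gloutonne(1, 0, [[]]): A returns (inf, [None]), B raises ValueError; on strategie_gloutonne(2, 1, [[5], [7]]): A returns (inf, [0, None]), B raises ValueError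
import Mathlib
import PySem

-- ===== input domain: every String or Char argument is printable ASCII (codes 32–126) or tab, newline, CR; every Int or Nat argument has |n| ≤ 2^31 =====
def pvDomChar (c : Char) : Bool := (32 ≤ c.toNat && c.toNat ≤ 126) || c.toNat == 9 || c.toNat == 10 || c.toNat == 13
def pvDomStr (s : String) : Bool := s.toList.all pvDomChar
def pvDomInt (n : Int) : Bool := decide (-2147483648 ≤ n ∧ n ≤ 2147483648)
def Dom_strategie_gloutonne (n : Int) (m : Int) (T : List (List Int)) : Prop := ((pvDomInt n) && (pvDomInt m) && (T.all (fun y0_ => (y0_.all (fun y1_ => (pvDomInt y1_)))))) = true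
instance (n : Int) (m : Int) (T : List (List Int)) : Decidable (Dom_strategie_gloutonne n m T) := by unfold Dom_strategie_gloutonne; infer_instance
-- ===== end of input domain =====

-- B replaces A's nested index loops with running min-state by a recursion over the rows of
-- T[:n], choosing per row the lexicographic min of filtered (cost, index) pairs and building
-- the result back-to-front (alternative decomposition, same cost). Return values only; neither
-- version mutates its arguments.

-- ===== PORT A =====
-- inner loop body of A: skip j == last_essence, keep strict min (min_cost=inf, min_essence=None ↦ none)
def pvStepA (row : List Int) (last : Option Int) (acc : Option Int × Option Int) (j : Int) :
    Option Int × Option Int :=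
  if some j ≠ last then
    let cost := (PySem.List.pyGet? row j).getD 0   -- index in range under Pre_
    match acc.1 with
    | none => (some cost, some j)                  -- cost < inf
    | some mc => if cost < mc then (some cost, some j) else acc
  else acc

-- outer loop body of A; state = (total_cost, used_essences, last_essence)
def pvRowA (m : Int) (T : List (List Int)) (st : Int × List Int × Option Int) (i : Int) :
    Int × List Int × Option Int :=
  let row := (PySem.List.pyGet? T i).getD []       -- i in range under Pre_
  let r := (PySem.List.pyRange 0 m 1).foldl (pvStepA row st.2.2) (none, none)
  -- min_cost = inf / min_essence = None (the `none` cases) occur only outside Pre_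
  (st.1 + r.1.getD 0, st.2.1 ++ [r.2.getD 0], r.2)

def strategie_gloutonne (n : Int) (m : Int) (T : List (List Int)) : Int × List Int :=
  let s := (PySem.List.pyRange 0 n 1).foldl (pvRowA m T) (0, [], none)
  (s.1, s.2.1)

-- ===== PORT B =====
-- the generator '(cost, j) for j, cost in enumerate(rows[0][:m]) if j != last'
def pvCands (m : Int) (last : Option Int) (row : List Int) : List (Int × Int) :=
  (PySem.List.enumerate (PySem.List.slice row none (some m))).filterMap
    (fun p => if some p.1 ≠ last then some (p.2, p.1) else none)

-- the recursive helper 'go'; min() of an empty generator (Python ValueError) is outside Pre_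
def pvGo (m : Int) (last : Option Int) : List (List Int) → Int × List Int
  | [] => (0, [])
  | row :: rest =>
    match PySem.List.min2? (pvCands m last row) Prod.fst Prod.snd with
    | some (c, j) =>
      let r := pvGo m (some j) rest
      (c + r.1, j :: r.2)
    | none => (0, [])

def strategie_gloutonne_alt (n : Int) (m : Int) (T : List (List Int)) : Int × List Int :=
  pvGo m none (PySem.List.slice T none (some (max n 0)))

-- ===== PRECONDITION & SPEC =====
-- Pre_ excludes exactly: inputs where A raises IndexError (fewer than n rows, or a used row
-- shorter than m), and inputs (m ≤ 0 with n ≥ 1, or m = 1 with n ≥ 2) on which A returns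
-- float('inf') and/or None — values outside the declared int/list-of-int result type.
def Pre_strategie_gloutonne (n : Int) (m : Int) (T : List (List Int)) : Prop :=
  0 < n → (n ≤ (T.length : Int) ∧ 1 ≤ m ∧ (2 ≤ n → 2 ≤ m) ∧
    ∀ row ∈ T.take n.toNat, m ≤ (row.length : Int))
instance (n : Int) (m : Int) (T : List (List Int)) : Decidable (Pre_strategie_gloutonne n m T) := by
  unfold Pre_strategie_gloutonne; infer_instance

def pvWitness_strategie_gloutonne : Int × Int × List (List Int) :=
  (3, 2, [[4, 1], [2, 9], [5, 5]])

def Spec_strategie_gloutonne (n : Int) (m : Int) (T : List (List Int)) (out : Int × List Int) : Prop := out = strategie_gloutonne_alt n m T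
instance (n : Int) (m : Int) (T : List (List Int)) (out : Int × List Int) : Decidable (Spec_strategie_gloutonne n m T out) := by unfold Spec_strategie_gloutonne; infer_instance

-- ===== CLAIM (what is proved, stated in full; the proofs are below) =====
def Claim_equal_strategie_gloutonne : Prop := ∀ (n : Int) (m : Int) (T : List (List Int)), Dom_strategie_gloutonne n m T → Pre_strategie_gloutonne n m T → Spec_strategie_gloutonne n m T (strategie_gloutonne n m T)

-- ===== LEMMAS AND PROOFS =====

-- the fold step hidden inside min2? (Prop-level form)
def pvStep2 (acc : Option (Int × Int)) (x : Int × Int) : Option (Int × Int) :=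
  match acc with
  | none => some x
  | some mm => if x.1 < mm.1 ∨ (¬ mm.1 < x.1 ∧ x.2 < mm.2) then some x else some mm

lemma pvMin2_eq_foldl (l : List (Int × Int)) :
    PySem.List.min2? l Prod.fst Prod.snd = l.foldl pvStep2 none := by
  unfold PySem.List.min2? pvStep2
  congr 1
  funext acc x
  cases acc with
  | none => rfl
  | some mm => by_cases h : x.1 < mm.1 ∨ (¬ mm.1 < x.1 ∧ x.2 < mm.2) <;> simp [h]

lemma pvFoldl_step2_mem (l : List (Int × Int)) (acc : Option (Int × Int)) (p : Int × Int)
    (h : l.foldl pvStep2 acc = some p) : acc = some p ∨ p ∈ l := by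
  induction l generalizing acc with
  | nil => exact Or.inl h
  | cons x t ih =>
    rcases ih (pvStep2 acc x) h with h' | h'
    · cases acc with
      | none => simp [pvStep2] at h'; simp [h']
      | some mm =>
        simp only [pvStep2] at h'
        split_ifs at h' with hc
        · simp at h'; simp [h']
        · exact Or.inl h'
    · simp [h']

lemma pvFoldl_step2_ne_none (l : List (Int × Int)) (acc : Option (Int × Int))
    (h : acc ≠ none ∨ l ≠ []) : l.foldl pvStep2 acc ≠ none := by
  induction l generalizing acc with
  | nil => simpa using h.resolve_right (by simp)
  | cons x t ih =>
    simp only [List.foldl_cons]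
    apply ih
    left
    cases acc with
    | none => simp [pvStep2]
    | some mm => simp only [pvStep2]; split_ifs <;> simp

lemma pvMem_enumerate (xs : List Int) (i : Nat) (s : Int) (h : i < xs.length) :
    ((s + (i : Int)), xs[i]) ∈ PySem.List.enumerate xs s := by
  induction xs generalizing i s with
  | nil => simp at h
  | cons y t ih =>
    rw [PySem.List.enumerate_cons]
    cases i with
    | zero => simp
    | succ k =>
      right
      have := ih k (s + 1) (by simpa using h)
      simpa [add_assoc, add_comm, add_left_comm] using this

lemma pvEnumerate_take_succ (xs : List Int) (k : Nat) (s : Int) (h : k < xs.length) :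
    PySem.List.enumerate (xs.take (k + 1)) s =
      PySem.List.enumerate (xs.take k) s ++ [(s + (k : Int), xs[k])] := by
  induction xs generalizing k s with
  | nil => simp at h
  | cons y t ih =>
    cases k with
    | zero => simp [PySem.List.enumerate_cons, PySem.List.enumerate_nil]
    | succ j =>
      simp only [List.take_succ_cons, PySem.List.enumerate_cons]
      rw [ih j (s + 1) (by simpa using h)]
      simp [add_comm, add_left_comm]

lemma pvEnum_fst_bound (xs : List Int) (s : Int) (a : Int × Int) :
    a ∈ PySem.List.enumerate xs s → s ≤ a.1 ∧ a.1 < s + xs.length := by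
  induction xs generalizing s with
  | nil => intro h; simp [PySem.List.enumerate_nil] at h
  | cons y t ih =>
    intro h
    rw [PySem.List.enumerate_cons] at h
    rcases List.mem_cons.mp h with h | h
    · simp [h]
    · have := ih (s + 1) h
      simp only [List.length_cons]
      push_cast
      omega

lemma pvCands_mem (m : Int) (last : Option Int) (row : List Int) (p : Int × Int)
    (hm : 0 ≤ m) (h : p ∈ pvCands m last row) :
    0 ≤ p.2 ∧ p.2 < m ∧ some p.2 ≠ last := by
  unfold pvCands at h
  rw [List.mem_filterMap] at h
  obtain ⟨a, ha, hf⟩ := h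
  rw [PySem.List.slice_to row hm] at ha
  have hb := pvEnum_fst_bound _ 0 a ha
  have hlen : ((row.take m.toNat).length : Int) ≤ m := by
    simp only [List.length_take]
    omega
  split_ifs at hf with hne
  · cases hf
    exact ⟨by simpa using hb.1, by simp; omega, by simpa using hne⟩

lemma pvCands_ne_nil (m : Int) (last : Option Int) (row : List Int)
    (hm : 1 ≤ m) (hrow : m ≤ (row.length : Int))
    (hl : last = none ∨ 2 ≤ m) : pvCands m last row ≠ [] := by
  have hlen : m.toNat ≤ row.length := by omega
  have htl : (row.take m.toNat).length = m.toNat := by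
    simp [List.length_take]; omega
  intro hnil
  have hmem : ∀ q : Int × Int, q ∉ pvCands m last row := by
    intro q hq; rw [hnil] at hq; simp at hq
  -- an index i < m with some i ≠ last yields a candidate
  have key : ∀ i : Nat, i < m.toNat → some (i : Int) ≠ last → False := by
    intro i hi hne
    have him : i < (row.take m.toNat).length := by omega
    have := pvMem_enumerate (row.take m.toNat) i 0 him
    apply hmem ((row.take m.toNat)[i], (i : Int))
    unfold pvCands
    rw [List.mem_filterMap, PySem.List.slice_to row (by omega)]
    exact ⟨((0 : Int) + (i : Int), (row.take m.toNat)[i]), this, by simp [hne]⟩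
  rcases hl with hl | hl
  · exact key 0 (by omega) (by simp [hl])
  · by_cases h0 : some (0 : Int) = last
    · exact key 1 (by omega) (by rw [← h0]; simp)
    · exact key 0 (by omega) h0

-- inner-scan correspondence: A's filtered min scan over range(m) computes the components
-- of the lexicographic minimum of the candidate pairs
lemma pvCands_succ (last : Option Int) (row : List Int) (k : Nat) (h : k < row.length) :
    pvCands ((k : Int) + 1) last row =
      pvCands (k : Int) last row ++
        (if some (k : Int) ≠ last then [(row[k], (k : Int))] else []) := by
  unfold pvCands
  have h1 : PySem.List.slice row none (some ((k : Int) + 1)) = row.take (k + 1) := by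
    rw [show ((k : Int) + 1) = ((k + 1 : Nat) : Int) by push_cast; ring,
      PySem.List.slice_to row (by positivity)]
    simp
  have h2 : PySem.List.slice row none (some (k : Int)) = row.take k := by
    rw [PySem.List.slice_to row (by positivity)]; simp
  rw [h1, h2, pvEnumerate_take_succ row k 0 h, List.filterMap_append]
  congr 1
  simp only [List.filterMap_cons, List.filterMap_nil, zero_add]
  split_ifs <;> rfl

lemma pvInner (row : List Int) (last : Option Int) (k : Nat) (hk : k ≤ row.length) :
    (PySem.List.pyRange 0 (k : Int) 1).foldl (pvStepA row last) (none, none) =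
      (((pvCands (k : Int) last row).foldl pvStep2 none).map Prod.fst,
       ((pvCands (k : Int) last row).foldl pvStep2 none).map Prod.snd) := by
  induction k with
  | zero =>
    have : pvCands ((0 : Nat) : Int) last row = [] := by
      unfold pvCands
      rw [PySem.List.slice_to row (by simp)]
      simp [PySem.List.enumerate_nil]
    rw [PySem.List.pyRange_one_eq_nil (by simp), this]
    rfl
  | succ k ih =>
    have hk' : k < row.length := by omega
    have hsplit : PySem.List.pyRange 0 ((k : Int) + 1) 1 =
        PySem.List.pyRange 0 (k : Int) 1 ++ [(k : Int)] :=
      PySem.List.pyRange_one_succ_right (by positivity)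
    push_cast
    rw [hsplit, List.foldl_append, ih (by omega), pvCands_succ last row k hk',
      List.foldl_append]
    have hcost : row[k]?.getD 0 = row[k] := by
      simp [List.getElem?_eq_getElem hk']
    by_cases hne : some (k : Int) ≠ last
    · rw [if_pos hne]
      simp only [List.foldl_cons, List.foldl_nil]
      rcases hcase : (pvCands ((k : Int)) last row).foldl pvStep2 none with _ | mm
      · simp [pvStepA, pvStep2, hne, hcost]
      · have hmem : mm ∈ pvCands ((k : Int)) last row := by
          rcases pvFoldl_step2_mem _ none mm hcase with h | h
          · exact absurd h (by simp)
          · exact h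
        have hmj : mm.2 < (k : Int) :=
          (pvCands_mem ((k : Int)) last row mm (by positivity) hmem).2.1
        have hcond : ¬ ((k : Int) < mm.2) := by omega
        by_cases hc : row[k] < mm.1
        · simp [pvStepA, pvStep2, hne, hcost, hc]
        · simp [pvStepA, pvStep2, hne, hcost, hc, hcond]
    · rw [if_neg hne]
      have hlast : some (k : Int) = last := by
        by_contra hx; exact hne hx
      simp [pvStepA, hlast]

-- outer correspondence: A's fold over range(i, n) equals B's recursion over the remaining rows
lemma pvOuter (m : Int) (T : List (List Int)) (n : Int) (hn : n ≤ (T.length : Int))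
    (hm : 1 ≤ m) (hrows : ∀ row ∈ T.take n.toNat, m ≤ (row.length : Int))
    (hm2 : 2 ≤ n → 2 ≤ m) :
    ∀ (d : Nat) (i : Int) (t : Int) (u : List Int) (last : Option Int),
      0 ≤ i → i + (d : Int) = n →
      (last = none ∨ 2 ≤ m ∨ d = 0) →
      ∃ l', (PySem.List.pyRange i n 1).foldl (pvRowA m T) (t, u, last) =
        (t + (pvGo m last ((T.take n.toNat).drop i.toNat)).1,
         u ++ (pvGo m last ((T.take n.toNat).drop i.toNat)).2, l') := by
  intro d
  induction d with
  | zero =>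
    intro i t u last hi hin _
    have hdrop : (T.take n.toNat).drop i.toNat = [] := by
      apply List.drop_eq_nil_of_le
      simp only [List.length_take]
      omega
    rw [PySem.List.pyRange_one_eq_nil (by omega), hdrop]
    exact ⟨last, by simp [pvGo]⟩
  | succ d ih =>
    intro i t u last hi hin hl
    have hiltn : i < n := by omega
    have hTi : (PySem.List.pyGet? T i).getD [] = T[i.toNat]'(by omega) := by
      rw [PySem.List.pyGet?_of_nonneg T hi]
      simp [List.getElem?_eq_getElem (by omega : i.toNat < T.length)]
    set row := T[i.toNat]'(by omega) with hrowdef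
    have hrowmem : row ∈ T.take n.toNat := by
      rw [hrowdef]
      have : i.toNat < (T.take n.toNat).length := by
        simp only [List.length_take]; omega
      have hEq : (T.take n.toNat)[i.toNat]'this = T[i.toNat]'(by omega) :=
        List.getElem_take
      rw [← hEq]
      exact List.getElem_mem this
    have hrowlen : m ≤ (row.length : Int) := hrows row hrowmem
    have hl' : last = none ∨ 2 ≤ m := by
      rcases hl with h | h | h
      · exact Or.inl h
      · exact Or.inr h
      · omega
    have hcne : pvCands m last row ≠ [] := pvCands_ne_nil m last row hm hrowlen hl'
    have hfne : (pvCands m last row).foldl pvStep2 none ≠ none :=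
      pvFoldl_step2_ne_none _ none (Or.inr hcne)
    obtain ⟨p, hp⟩ := Option.ne_none_iff_exists'.mp hfne
    have hpmem : p ∈ pvCands m last row := by
      rcases pvFoldl_step2_mem _ none p hp with h | h
      · exact absurd h (by simp)
      · exact h
    obtain ⟨hp0, hpm, hpne⟩ := pvCands_mem m last row p (by omega) hpmem
    -- A's row step
    have hinner := pvInner row last m.toNat (by omega)
    rw [show ((m.toNat : Nat) : Int) = m by omega] at hinner
    have hrowA : pvRowA m T (t, u, last) i = (t + p.1, u ++ [p.2], some p.2) := by
      simp only [pvRowA, hTi, hinner, hp, Option.map_some, Option.getD_some]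
    -- B's row step
    have hdrop : (T.take n.toNat).drop i.toNat =
        row :: (T.take n.toNat).drop (i.toNat + 1) := by
      have hlt : i.toNat < (T.take n.toNat).length := by
        simp only [List.length_take]; omega
      rw [List.drop_eq_getElem_cons hlt]
      congr 1
      exact List.getElem_take
    have hmin : PySem.List.min2? (pvCands m last row) Prod.fst Prod.snd = some p := by
      rw [pvMin2_eq_foldl]; exact hp
    have hgo : pvGo m last ((T.take n.toNat).drop i.toNat) =
        (p.1 + (pvGo m (some p.2) ((T.take n.toNat).drop (i.toNat + 1))).1,
         p.2 :: (pvGo m (some p.2) ((T.take n.toNat).drop (i.toNat + 1))).2) := by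
      rw [hdrop]
      obtain ⟨c, j⟩ := p
      simp only [pvGo, hmin]
    -- recurse
    have hl2 : (some p.2 : Option Int) = none ∨ 2 ≤ m ∨ d = 0 := by
      by_cases hd : d = 0
      · exact Or.inr (Or.inr hd)
      · refine Or.inr (Or.inl (hm2 (by omega)))
    obtain ⟨l', hrec⟩ := ih (i + 1) (t + p.1) (u ++ [p.2]) (some p.2)
      (by omega) (by omega) hl2
    refine ⟨l', ?_⟩
    rw [PySem.List.pyRange_one_cons hiltn]
    simp only [List.foldl_cons]
    rw [hrowA]
    have hnat : (i + 1).toNat = i.toNat + 1 := by omega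
    rw [hnat] at hrec
    rw [hrec, hgo]
    simp [add_assoc]

-- ===== VERDICT (by name: the statement is the Claim_ definition above) =====
theorem strategie_gloutonne_spec : Claim_equal_strategie_gloutonne := by
  intro n m T _ hPre
  unfold Spec_strategie_gloutonne strategie_gloutonne strategie_gloutonne_alt
  by_cases hn : 0 < n
  · obtain ⟨hlen, hm, hnm, hrows⟩ := hPre hn
    have hslice : PySem.List.slice T none (some (max n 0)) = T.take n.toNat := by
      rw [show max n 0 = n by omega, PySem.List.slice_to T (by omega)]
    obtain ⟨l', hfold⟩ := pvOuter m T n hlen hm hrows hnm n.toNat 0 0 [] none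
      (by omega) (by omega) (Or.inl rfl)
    rw [hslice]
    simp only [Int.toNat_zero, List.drop_zero] at hfold
    rw [hfold]
    simp
  · rw [PySem.List.pyRange_one_eq_nil (by omega)]
    rw [show max n 0 = 0 by omega, PySem.List.slice_to T (by omega)]
    simp [pvGo]
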